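-- pv_equiv track=rewrite | github.com/rajlath/rkl_codes | codility/number_solitaire.py | solution
-- ===== SOURCE A (Python) =====
-- def solution(A):
--     '''
--     type A: int array
--     rtype : int
--     '''
--     max_here = [0] * len(A)
--     max_here[0] = A[0]
--     for i in range(1, len(A)):
--
--         if i <= 6:
--             max_here[i] = A[i] + max(max_here[0:i])
--         else:
--             max_here[i] = A[i] + max(max_here[i - 6: i])
--     return max_here[-1]
-- ===== SOURCE B (Python) =====
-- def solution(A):
--     # monotone max-deque over the dp values: fst strictly increasing, snd strictly
--     # decreasing; the front is always the maximum of the last (up to) 6 dp values,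
--     # so no max() scan over the window is ever performed.
--     best = A[0]
--     dq = [(0, A[0])]
--     for i in range(1, len(A)):
--         while dq and dq[0][0] < i - 6:
--             del dq[0]
--         cur = A[i] + dq[0][1]
--         while dq and dq[-1][1] <= cur:
--             dq.pop()
--         dq.append((i, cur))
--         best = cur
--     return best
-- ===== Notes on version B (the rewrite author's own statement) =====
-- stated objective: alternative
-- what changed: Replaces the per-step max() scan over the previous six dp values by a monotone max-deque (classic sliding-window-maximum): each dp value is pushed once and popped at most once, the window maximum is always the deque's front, so no inner max scan remains.
-- outside the precondition, e.g. on solution([]): A raises IndexError, B raises IndexError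
import Mathlib
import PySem

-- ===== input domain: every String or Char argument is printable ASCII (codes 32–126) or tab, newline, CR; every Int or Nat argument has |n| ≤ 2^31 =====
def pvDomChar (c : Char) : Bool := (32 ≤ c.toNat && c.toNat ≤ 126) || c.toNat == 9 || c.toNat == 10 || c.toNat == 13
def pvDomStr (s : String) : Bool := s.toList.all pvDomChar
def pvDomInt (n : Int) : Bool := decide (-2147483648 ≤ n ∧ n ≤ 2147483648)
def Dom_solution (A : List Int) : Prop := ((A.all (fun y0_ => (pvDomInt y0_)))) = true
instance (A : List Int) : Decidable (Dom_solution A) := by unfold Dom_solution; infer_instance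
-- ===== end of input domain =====

-- B replaces A's per-step max() scan over the previous six dp values by a monotone
-- max-deque (sliding-window maximum): each dp value is pushed once and popped at most
-- once, the window maximum is read off the deque's front; no inner max scan remains.
-- Both programs raise IndexError on the empty list; Pre_ excludes exactly that input.


-- ===== PORT A =====
-- loop body of A's 'for i in range(1, len(A))' (a named helper so the lemmas can cite it)
def stepA (A : List Int) (mh : List Int) (i : Int) : List Int :=
  PySem.List.pySetD mh i
    (PySem.List.pyGetD A i 0 +
      (if i ≤ 6 then
        (PySem.List.max? (PySem.List.slice mh (some 0) (some i)) (fun y => y)).getD 0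
      else
        (PySem.List.max? (PySem.List.slice mh (some (i - 6)) (some i)) (fun y => y)).getD 0))

def solution (A : List Int) : Int :=
  let n := A.length
  let mh0 := PySem.List.pySetD (List.replicate n (0 : Int)) 0 (PySem.List.pyGetD A 0 0)
  let mh := (PySem.List.pyRange 1 (n : Int) 1).foldl (stepA A) mh0
  PySem.List.pyGetD mh (-1) 0

-- ===== PORT B =====
-- 'while dq and dq[0][0] < i - 6: del dq[0]'  — pops from the front while the condition
-- holds, i.e. List.dropWhile (exact)
def popFrontB (b : Int) (dq : List (Int × Int)) : List (Int × Int) :=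
  dq.dropWhile (fun p => decide (p.1 < b))

-- 'while dq and dq[-1][1] <= cur: dq.pop()'  — pops from the BACK while the condition
-- holds: dropWhile on the reversed list, reversed back (exact)
def popBackB (cur : Int) (dq : List (Int × Int)) : List (Int × Int) :=
  (dq.reverse.dropWhile (fun p => decide (p.2 ≤ cur))).reverse

-- loop body of B's 'for i in range(1, len(A))'; state = (dq, best).
-- dq[0][1] is read with pyGetD: dq is provably nonempty there for every input in Pre_
-- (the entry appended at the previous step is never front-evicted).
def stepB (A : List Int) (st : List (Int × Int) × Int) (i : Int) : List (Int × Int) × Int :=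
  let dq1 := popFrontB (i - 6) st.1
  let cur := PySem.List.pyGetD A i 0 + (PySem.List.pyGetD dq1 0 ((0 : Int), (0 : Int))).2
  let dq2 := popBackB cur dq1
  (dq2 ++ [(i, cur)], cur)

def solution_alt (A : List Int) : Int :=
  let a0 := PySem.List.pyGetD A 0 0
  ((PySem.List.pyRange 1 (A.length : Int) 1).foldl (stepB A) ([((0 : Int), a0)], a0)).2

-- ===== PRECONDITION & SPEC =====
-- A raises IndexError on the empty list (A[0]); B raises there too. Pre_ excludes exactly [].
def Pre_solution (A : List Int) : Prop := A ≠ []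
instance (A : List Int) : Decidable (Pre_solution A) := by unfold Pre_solution; infer_instance
def pvWitness_solution : List Int := [1, -2, 3]

def Spec_solution (A : List Int) (out : Int) : Prop := out = solution_alt A
instance (A : List Int) (out : Int) : Decidable (Spec_solution A out) := by unfold Spec_solution; infer_instance

-- ===== CLAIM (what is proved, stated in full; the proofs are below) =====
def Claim_equal_solution : Prop := ∀ (A : List Int), Dom_solution A → Pre_solution A → Spec_solution A (solution A)

-- ===== LEMMAS AND PROOFS =====

-- the DP sequence both programs compute: bestList A k = [best 0, …, best k], where best i is the
-- maximal score of a path ending at i with steps of length ≤ 6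
def bestList (A : List Int) : Nat → List Int
  | 0 => [A.getD 0 0]
  | k + 1 =>
      let prev := bestList A k
      prev ++ [A.getD (k + 1) 0 +
        (PySem.List.max? (prev.drop (k + 1 - 6)) (fun y => y)).getD 0]

-- dp A k = the k-th DP value
def dp (A : List Int) (k : Nat) : Int := (bestList A k).getD k 0

theorem length_bestList (A : List Int) (k : Nat) : (bestList A k).length = k + 1 := by
  induction k with
  | zero => rfl
  | succ k ih => simp [bestList, ih]

theorem dp_succ' (A : List Int) (k : Nat) :
    dp A (k + 1) = A.getD (k + 1) 0 +
      (PySem.List.max? ((bestList A k).drop (k + 1 - 6)) (fun y => y)).getD 0 := by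
  unfold dp
  have h : bestList A (k + 1) = bestList A k ++ [A.getD (k + 1) 0 +
      (PySem.List.max? ((bestList A k).drop (k + 1 - 6)) (fun y => y)).getD 0] := rfl
  rw [h, List.getD_eq_getElem _ _ (by simp [length_bestList]),
      List.getElem_append_right (by simp [length_bestList])]
  simp [length_bestList]

theorem bestList_eq_map (A : List Int) (k : Nat) :
    bestList A k = (List.range (k + 1)).map (dp A) := by
  induction k with
  | zero => rfl
  | succ k ih =>
    have h : bestList A (k + 1) = bestList A k ++ [A.getD (k + 1) 0 +
        (PySem.List.max? ((bestList A k).drop (k + 1 - 6)) (fun y => y)).getD 0] := rfl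
    rw [h, List.range_succ, List.map_append, ← ih, List.map_singleton, ← dp_succ' A k]

theorem dp_succ (A : List Int) (k : Nat) :
    dp A (k + 1) = A.getD (k + 1) 0 +
      (PySem.List.max? (((List.range (k + 1)).map (dp A)).drop (k + 1 - 6)) (fun y => y)).getD 0 := by
  rw [dp_succ', bestList_eq_map]

-- A's array after the loop has run up to index k is bestList A k padded with the untouched zeros
theorem invA (A : List Int) (hA : A ≠ []) (k : Nat) (hk : k < A.length) :
    (PySem.List.pyRange 1 ((k : Int) + 1) 1).foldl (stepA A)
        (PySem.List.pySetD (List.replicate A.length (0 : Int)) 0 (PySem.List.pyGetD A 0 0))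
      = bestList A k ++ List.replicate (A.length - (k + 1)) 0 := by
  induction k with
  | zero =>
    rw [PySem.List.pyRange_one_eq_nil (by norm_num), List.foldl_nil]
    obtain ⟨a, as, rfl⟩ := List.exists_cons_of_ne_nil hA
    simp [bestList, List.replicate_succ, PySem.List.pyGetD_zero, PySem.List.pySetD_of_nonneg]
  | succ k ih =>
    have hk' : k < A.length := by omega
    rw [show (((k + 1 : Nat) : Int) + 1) = ((k : Int) + 1) + 1 by push_cast; ring,
        PySem.List.pyRange_one_succ_right (by omega), List.foldl_append, ih hk',
        List.foldl_cons, List.foldl_nil]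
    set P := bestList A k with hP
    have hlenP : P.length = k + 1 := length_bestList A k
    have hcast : (k : Int) + 1 = ((k + 1 : Nat) : Int) := by push_cast; ring
    unfold stepA
    rw [hcast, PySem.List.pyGetD_natCast]
    have hwin : (if ((k + 1 : Nat) : Int) ≤ 6 then
        (PySem.List.max? (PySem.List.slice (P ++ List.replicate (A.length - (k + 1)) 0) (some 0) (some ((k + 1 : Nat) : Int))) (fun y => y)).getD 0
      else
        (PySem.List.max? (PySem.List.slice (P ++ List.replicate (A.length - (k + 1)) 0) (some (((k + 1 : Nat) : Int) - 6)) (some ((k + 1 : Nat) : Int))) (fun y => y)).getD 0)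
        = (PySem.List.max? (P.drop (k + 1 - 6)) (fun y => y)).getD 0 := by
      split_ifs with h6
      · have hk6 : k + 1 - 6 = 0 := by omega
        rw [PySem.List.slice_zero_start, PySem.List.slice_to_natCast,
            List.take_append_of_le_length (by omega), List.take_of_length_le (by omega), hk6,
            List.drop_zero]
      · have h6' : 6 < k + 1 := by exact_mod_cast (by omega : (6:Int) < ((k+1:Nat):Int))
        have hc : (((k + 1 : Nat) : Int) - 6) = ((k + 1 - 6 : Nat) : Int) := by omega
        rw [hc, PySem.List.slice_natCast, List.drop_append_of_le_length (by omega)]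
        have hl : ((P.drop (k + 1 - 6)).length) = 6 := by simp [hlenP]; omega
        rw [show k + 1 - (k + 1 - 6) = 6 by omega, List.take_append_of_le_length (by omega),
            List.take_of_length_le (by omega)]
    rw [hwin, PySem.List.pySetD_natCast]
    rw [show A.length - (k + 1) = (A.length - (k + 2)) + 1 by omega, List.replicate_succ]
    rw [List.set_append_right _ _ (by omega), show k + 1 - P.length = 0 by omega,
        List.set_cons_zero]
    rw [show bestList A (k+1) = P ++ [A.getD (k + 1) 0 +
        (PySem.List.max? (P.drop (k + 1 - 6)) (fun y => y)).getD 0] from rfl]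
    simp

-- ---- B-side: the monotone-deque invariant ----

-- along the deque, indices strictly increase and values strictly decrease
def DQrel (a b : Int × Int) : Prop := a.1 < b.1 ∧ b.2 < a.2

def DQInv (A : List Int) (k : Nat) (dq : List (Int × Int)) : Prop :=
  dq.Pairwise DQrel ∧
  (∀ e ∈ dq, ∃ j : Nat, e = ((j : Int), dp A j) ∧ k - 6 ≤ j ∧ j ≤ k) ∧
  dq.getLast? = some ((k : Int), dp A k) ∧
  (∀ j : Nat, k - 6 ≤ j → j ≤ k → ∃ e ∈ dq, (j : Int) ≤ e.1 ∧ dp A j ≤ e.2)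

theorem dqInv_zero (A : List Int) : DQInv A 0 [((0 : Int), dp A 0)] := by
  refine ⟨List.pairwise_singleton _ _, ?_, by simp, ?_⟩
  · intro e he; simp at he; exact ⟨0, by simp [he], by omega, by omega⟩
  · intro j h1 h2
    have : j = 0 := by omega
    subst this
    exact ⟨((0:Int), dp A 0), by simp⟩

-- in a Pairwise list, the head is related to every other element
theorem pairwise_head_rel {α : Type} {R : α → α → Prop} (l : List α) (h : l.Pairwise R)
    (hne : l ≠ []) : ∀ e ∈ l, e = l.head hne ∨ R (l.head hne) e := by
  cases l with
  | nil => exact absurd rfl hne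
  | cons a t =>
    intro e he
    rcases List.mem_cons.mp he with rfl | ht
    · exact Or.inl rfl
    · exact Or.inr ((List.pairwise_cons.mp h).1 e ht)

-- membership in the dropped window of DP values
theorem mem_window_iff (A : List Int) (n m : Nat) (v : Int) :
    v ∈ ((List.range n).map (dp A)).drop m ↔ ∃ j, m ≤ j ∧ j < n ∧ v = dp A j := by
  rw [← List.map_drop, List.range_eq_range', List.drop_range']
  simp only [List.mem_map, List.mem_range'_1]
  constructor
  · rintro ⟨j, ⟨h1, h2⟩, rfl⟩; exact ⟨j, by omega, by omega, rfl⟩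
  · rintro ⟨j, h1, h2, rfl⟩; exact ⟨j, ⟨by omega, by omega⟩, rfl⟩

theorem inv_step (A : List Int) (k : Nat) (dq : List (Int × Int)) (h : DQInv A k dq) :
    ∃ dq', stepB A (dq, dp A k) ((k : Int) + 1) = (dq', dp A (k + 1)) ∧ DQInv A (k + 1) dq' := by
  obtain ⟨hpw, hmem, hlast, hcomp⟩ := h
  -- the front eviction: dq1 = dropWhile (·.1 < k+1-6) dq
  set dq1 : List (Int × Int) := dq.dropWhile (fun p => decide (p.1 < (k : Int) + 1 - 6))
    with hdq1_def
  have hsub1 : dq1.Sublist dq := (List.dropWhile_suffix _).sublist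
  have hpw1 : dq1.Pairwise DQrel := hpw.sublist hsub1
  have hlast_mem : ((k : Int), dp A k) ∈ dq := List.mem_of_getLast? hlast
  have hne1 : dq1 ≠ [] := by
    intro hnil
    have := (List.dropWhile_eq_nil_iff).mp hnil _ hlast_mem
    simp only [decide_eq_true_eq] at this
    omega
  -- every un-evicted element of dq is in dq1
  have hkeep1 : ∀ e ∈ dq, ¬ (e.1 < (k : Int) + 1 - 6) → e ∈ dq1 := by
    intro e he hnb
    rw [← List.takeWhile_append_dropWhile
      (p := fun p => decide (p.1 < (k : Int) + 1 - 6)) (l := dq)] at he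
    rcases List.mem_append.mp he with h1 | h2
    · have := List.mem_takeWhile_imp h1
      simp only [decide_eq_true_eq] at this
      exact absurd this hnb
    · exact h2
  set hd : Int × Int := dq1.head hne1 with hhd_def
  have hhd_not : ¬ (hd.1 < (k : Int) + 1 - 6) := by
    have := List.head_dropWhile_not (fun p : Int × Int => decide (p.1 < (k : Int) + 1 - 6)) hne1
    simpa using this
  have hhd_mem1 : hd ∈ dq1 := List.head_mem hne1
  have hhd_mem : hd ∈ dq := hsub1.subset hhd_mem1
  obtain ⟨j0, hj0e, _, hj0u⟩ := hmem hd hhd_mem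
  have hj0lb : k + 1 - 6 ≤ j0 := by
    have h' := hhd_not
    rw [hj0e] at h'
    simp only at h'
    omega
  -- all of dq1 sits at or beyond the new window's left edge
  have hall1 : ∀ e ∈ dq1, (k : Int) + 1 - 6 ≤ e.1 := by
    intro e he
    rcases pairwise_head_rel dq1 hpw1 hne1 e he with rfl | hr
    · exact not_lt.mp hhd_not
    · exact le_of_lt (lt_of_le_of_lt (not_lt.mp hhd_not) hr.1)
  -- the head dominates every value in dq1
  have hdom1 : ∀ e ∈ dq1, e.2 ≤ hd.2 := by
    intro e he
    rcases pairwise_head_rel dq1 hpw1 hne1 e he with rfl | hr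
    · exact le_refl _
    · exact le_of_lt hr.2
  -- hence the head's value is the maximum of the new window of DP values
  have hwinmax : ∀ j, k + 1 - 6 ≤ j → j ≤ k → dp A j ≤ hd.2 := by
    intro j h1 h2
    obtain ⟨e, he, he1, he2⟩ := hcomp j (by omega) h2
    have hin : e ∈ dq1 := hkeep1 e he (by omega)
    exact le_trans he2 (hdom1 e hin)
  -- the value computed by the loop body is dp A (k+1)
  have hcur : PySem.List.pyGetD A ((k : Int) + 1) 0
      + (PySem.List.pyGetD dq1 0 ((0 : Int), (0 : Int))).2 = dp A (k + 1) := by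
    have hgetA : PySem.List.pyGetD A ((k : Int) + 1) 0 = A.getD (k + 1) 0 := by
      rw [show ((k : Int) + 1) = ((k + 1 : Nat) : Int) by push_cast; ring,
        PySem.List.pyGetD_natCast]
    have hget1 : PySem.List.pyGetD dq1 0 ((0 : Int), (0 : Int)) = hd := by
      rw [PySem.List.pyGetD_zero]
      cases hq : dq1 with
      | nil => exact absurd hq hne1
      | cons a t => simp [hhd_def, hq]
    have hwv : (PySem.List.max? (((List.range (k + 1)).map (dp A)).drop (k + 1 - 6))
        (fun y => y)).getD 0 = hd.2 := by
      have hhd2 : hd.2 ∈ ((List.range (k + 1)).map (dp A)).drop (k + 1 - 6) :=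
        (mem_window_iff A (k + 1) (k + 1 - 6) _).mpr ⟨j0, hj0lb, by omega, by rw [hj0e]⟩
      cases hmx : PySem.List.max? (((List.range (k + 1)).map (dp A)).drop (k + 1 - 6))
          (fun y => y) with
      | none =>
        rw [PySem.List.max?_eq_none_iff] at hmx
        rw [hmx] at hhd2
        exact absurd hhd2 (List.not_mem_nil)
      | some m =>
        obtain ⟨j1, hj1l, hj1u, rfl⟩ :=
          (mem_window_iff A (k + 1) (k + 1 - 6) m).mp (PySem.List.max?_mem hmx)
        have h1 : dp A j1 ≤ hd.2 := hwinmax j1 hj1l (by omega)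
        have h2 : hd.2 ≤ dp A j1 := PySem.List.max?_isMax hmx hd.2 hhd2
        simpa using le_antisymm h1 h2
    rw [hgetA, hget1, dp_succ A k, hwv]
  -- the back eviction: dq2 = dq1 with its ≤-cur tail popped
  set cur : Int := dp A (k + 1) with hcur_set
  set dq2 : List (Int × Int) := (dq1.reverse.dropWhile (fun p => decide (p.2 ≤ cur))).reverse
    with hdq2_def
  have hsub2 : dq2.Sublist dq1 := by
    have h1 : (dq1.reverse.dropWhile (fun p => decide (p.2 ≤ cur))).Sublist dq1.reverse :=
      (List.dropWhile_suffix _).sublist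
    simpa [hdq2_def] using h1.reverse
  have hkeep2 : ∀ e ∈ dq1, ¬ (e.2 ≤ cur) → e ∈ dq2 := by
    intro e he hnb
    rw [hdq2_def, List.mem_reverse]
    have he' : e ∈ dq1.reverse := List.mem_reverse.mpr he
    rw [← List.takeWhile_append_dropWhile
      (p := fun p => decide (p.2 ≤ cur)) (l := dq1.reverse)] at he'
    rcases List.mem_append.mp he' with h1 | h2
    · have := List.mem_takeWhile_imp h1
      simp only [decide_eq_true_eq] at this
      exact absurd this hnb
    · exact h2
  -- every surviving element's value exceeds cur
  have hgt2 : ∀ e ∈ dq2, cur < e.2 := by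
    intro e he
    have hpwr : dq1.reverse.Pairwise (fun a b => DQrel b a) :=
      (List.pairwise_reverse).mpr hpw1
    set r : List (Int × Int) := dq1.reverse.dropWhile (fun p => decide (p.2 ≤ cur)) with hr_def
    have hpwr' : r.Pairwise (fun a b => DQrel b a) :=
      hpwr.sublist ((List.dropWhile_suffix _).sublist)
    have her : e ∈ r := by rwa [hdq2_def, List.mem_reverse] at he
    have hner : r ≠ [] := List.ne_nil_of_mem her
    have hhr : ¬ ((r.head hner).2 ≤ cur) := by
      have := List.head_dropWhile_not (fun p : Int × Int => decide (p.2 ≤ cur)) hner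
      simpa using this
    rcases pairwise_head_rel r hpwr' hner e her with rfl | hrel
    · omega
    · have := hrel.2; omega
  refine ⟨dq2 ++ [((k : Int) + 1, cur)], ?_, ?_, ?_, ?_, ?_⟩
  · -- the step equation
    show (popBackB (PySem.List.pyGetD A ((k : Int) + 1) 0
            + (PySem.List.pyGetD dq1 0 ((0 : Int), (0 : Int))).2) dq1
          ++ [((k : Int) + 1, PySem.List.pyGetD A ((k : Int) + 1) 0
            + (PySem.List.pyGetD dq1 0 ((0 : Int), (0 : Int))).2)],
        PySem.List.pyGetD A ((k : Int) + 1) 0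
            + (PySem.List.pyGetD dq1 0 ((0 : Int), (0 : Int))).2)
      = (dq2 ++ [((k : Int) + 1, cur)], cur)
    rw [hcur]
    rfl
  · -- pairwise
    rw [List.pairwise_append]
    refine ⟨hpw1.sublist hsub2, List.pairwise_singleton _ _, ?_⟩
    intro e he e' he'
    rcases List.mem_singleton.mp he' with rfl
    obtain ⟨j, hje, _, hju⟩ := hmem e (hsub1.subset (hsub2.subset he))
    constructor
    · rw [hje]; simp only; omega
    · exact hgt2 e he
  · -- membership
    intro e he
    rcases List.mem_append.mp he with h1 | h2
    · obtain ⟨j, hje, _, hju⟩ := hmem e (hsub1.subset (hsub2.subset h1))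
      refine ⟨j, hje, ?_, by omega⟩
      have := hall1 e (hsub2.subset h1)
      rw [hje] at this; simp only at this; omega
    · rcases List.mem_singleton.mp h2 with rfl
      exact ⟨k + 1, by push_cast; simp [hcur_set], by omega, by omega⟩
  · -- last element
    rw [List.getLast?_concat, hcur_set]
    norm_cast
  · -- completeness
    intro j h1 h2
    by_cases hj : j = k + 1
    · subst hj
      exact ⟨((k : Int) + 1, cur), List.mem_append_right _ (List.mem_singleton.mpr rfl),
        by simp only; omega, by simp [hcur_set]⟩
    · have h2' : j ≤ k := by omega
      obtain ⟨e, he, he1, he2⟩ := hcomp j (by omega) h2'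
      have hin1 : e ∈ dq1 := hkeep1 e he (by omega)
      by_cases hle : dp A j ≤ cur
      · exact ⟨((k : Int) + 1, cur), List.mem_append_right _ (List.mem_singleton.mpr rfl),
          by simp only; omega, by simpa [hcur_set] using hle⟩
      · have hin2 : e ∈ dq2 := hkeep2 e hin1 (by omega)
        exact ⟨e, List.mem_append_left _ hin2, he1, he2⟩

theorem invB (A : List Int) (k : Nat) :
    ∃ dq, (PySem.List.pyRange 1 ((k : Int) + 1) 1).foldl (stepB A)
        ([((0 : Int), PySem.List.pyGetD A 0 0)], PySem.List.pyGetD A 0 0) = (dq, dp A k)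
      ∧ DQInv A k dq := by
  induction k with
  | zero =>
    rw [PySem.List.pyRange_one_eq_nil (by norm_num), List.foldl_nil]
    have h0 : PySem.List.pyGetD A 0 0 = dp A 0 := by
      simp [PySem.List.pyGetD_zero, dp, bestList]
    rw [h0]
    exact ⟨_, rfl, dqInv_zero A⟩
  | succ k ih =>
    obtain ⟨dq, hfold, hinv⟩ := ih
    obtain ⟨dq', hstep, hinv'⟩ := inv_step A k dq hinv
    refine ⟨dq', ?_, hinv'⟩
    rw [show (((k + 1 : Nat) : Int) + 1) = ((k : Int) + 1) + 1 by push_cast; ring,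
        PySem.List.pyRange_one_succ_right (by omega), List.foldl_append, hfold,
        List.foldl_cons, List.foldl_nil, hstep]

theorem solution_eq_alt (A : List Int) (hA : A ≠ []) : solution A = solution_alt A := by
  have hn : 1 ≤ A.length := List.length_pos_iff.mpr hA
  have hk : A.length - 1 < A.length := by omega
  have hcast : ((A.length : Int)) = ((A.length - 1 : Nat) : Int) + 1 := by omega
  -- A-side: the last DP cell
  have hAside : solution A = dp A (A.length - 1) := by
    unfold solution
    show PySem.List.pyGetD ((PySem.List.pyRange 1 (A.length : Int) 1).foldl (stepA A)
        (PySem.List.pySetD (List.replicate A.length (0:Int)) 0 (PySem.List.pyGetD A 0 0))) (-1) 0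
      = dp A (A.length - 1)
    rw [hcast, invA A hA (A.length - 1) hk,
        show A.length - (A.length - 1 + 1) = 0 by omega]
    simp only [List.replicate_zero, List.append_nil]
    have hlen := length_bestList A (A.length - 1)
    have hne : bestList A (A.length - 1) ≠ [] := by
      intro h; rw [h] at hlen; simp at hlen
    rw [PySem.List.pyGetD_neg_one _ _ hne, List.getLast_eq_getElem]
    unfold dp
    rw [List.getD_eq_getElem _ _ (by omega)]
    congr 1
    omega
  -- B-side: the accumulator is the last DP value
  have hBside : solution_alt A = dp A (A.length - 1) := by
    unfold solution_alt
    obtain ⟨dq, hfold, _⟩ := invB A (A.length - 1)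
    rw [hcast] at *
    show ((PySem.List.pyRange 1 (((A.length - 1 : Nat) : Int) + 1) 1).foldl (stepB A)
        ([((0 : Int), PySem.List.pyGetD A 0 0)], PySem.List.pyGetD A 0 0)).2 = dp A (A.length - 1)
    rw [hfold]
  rw [hAside, hBside]

-- ===== VERDICT (by name: the statement is the Claim_ definition above) =====
theorem solution_spec : Claim_equal_solution := by
  intro A _ hA
  exact solution_eq_alt A hA
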